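-- pv_equiv track=rewrite | github.com/PatrykCzaniecki/A-lot-of-Codecool-projects | Roguelike Game/engine.py | boss_room
-- ===== SOURCE A (Python) =====
-- def boss_room(width, height, player_character):
--     map_1 = []
--     board = []
--     char_empty_spaces = ' '
--     char_wall = 'x'
--     #CREATING EMPTY MAP
--     for x in range(width + 1):
--         map_1.append(char_empty_spaces)
--     for z in range(height + 1):
--         board.append(map_1.copy())
--     #CREATING WALLS
--     for y in range(height + 1):
--         board[y][0] = char_wall
--     for y in range(width + 1):
--         board[0][y] = char_wall
--     for y in range(height + 1):
--         board[y][width] = char_wall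
--     for y in range(width):
--         board[height][y] = char_wall
--     board[13][7] = player_character
--     board[4][7] = 'B'
--     player_position = (13, 7)
--     return board, player_position
-- ===== SOURCE B (Python) =====
-- def boss_room(width, height, player_character):
--     board = [['x' if x == 0 or x == width or y == 0 or y == height else ' '
--               for x in range(width + 1)]
--              for y in range(height + 1)]
--     board[13][7] = player_character
--     board[4][7] = 'B'
--     return board, (13, 7)
-- ===== Notes on version B (the rewrite author's own statement) =====
-- stated objective: simpler
-- what changed: The grid is built in one nested comprehension that computes each cell's wall/blank value directly from its coordinates, replacing A's blank-row allocation plus four directional wall-overwrite passes; only the two hardcoded player/boss writes remain.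
import Mathlib
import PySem

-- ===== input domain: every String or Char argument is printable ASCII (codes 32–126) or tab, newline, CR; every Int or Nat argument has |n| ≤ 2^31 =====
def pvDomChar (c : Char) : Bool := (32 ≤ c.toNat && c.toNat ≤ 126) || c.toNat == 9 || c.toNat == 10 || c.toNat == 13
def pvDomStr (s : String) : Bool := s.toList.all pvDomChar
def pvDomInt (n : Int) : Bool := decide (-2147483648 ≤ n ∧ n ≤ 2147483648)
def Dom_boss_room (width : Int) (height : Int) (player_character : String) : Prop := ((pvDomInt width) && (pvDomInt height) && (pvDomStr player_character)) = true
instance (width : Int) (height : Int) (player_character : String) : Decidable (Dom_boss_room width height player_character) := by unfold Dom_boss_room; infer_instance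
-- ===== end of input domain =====

-- B computes each cell once from its coordinates in one nested comprehension instead of
-- A's blank-board allocation followed by six mutation passes; objective: simpler.


-- ===== PORT A =====
-- Python 'row[j] = v': exact for 0 ≤ j (every index A writes is nonnegative); out-of-range
-- writes (Python IndexError) are excluded by Pre_boss_room, where this is a no-op.
def pySetRow (row : List String) (j : Int) (v : String) : List String :=
  if 0 ≤ j ∧ j.toNat < row.length then row.set j.toNat v else row

-- Python 'board[i][j] = v' under the same convention.
def pySet2 (b : List (List String)) (i j : Int) (v : String) : List (List String) :=
  if h : 0 ≤ i ∧ i.toNat < b.length then b.set i.toNat (pySetRow b[i.toNat] j v) else b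

def boss_room (width : Int) (height : Int) (player_character : String) : List (List String) × (Int × Int) :=
  let map_1 := (PySem.List.pyRange 0 (width + 1)).foldl (fun m _ => m ++ [" "]) []
  let board := (PySem.List.pyRange 0 (height + 1)).foldl (fun b _ => b ++ [map_1]) []
  let board := (PySem.List.pyRange 0 (height + 1)).foldl (fun b y => pySet2 b y 0 "x") board
  let board := (PySem.List.pyRange 0 (width + 1)).foldl (fun b y => pySet2 b 0 y "x") board
  let board := (PySem.List.pyRange 0 (height + 1)).foldl (fun b y => pySet2 b y width "x") board
  let board := (PySem.List.pyRange 0 width).foldl (fun b y => pySet2 b height y "x") board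
  let board := pySet2 board 13 7 player_character
  let board := pySet2 board 4 7 "B"
  (board, (13, 7))

-- ===== PORT B =====
def wallCell (width : Int) (height : Int) (y x : Int) : String :=
  if x = 0 ∨ x = width ∨ y = 0 ∨ y = height then "x" else " "

def boss_room_alt (width : Int) (height : Int) (player_character : String) : List (List String) × (Int × Int) :=
  let board := (PySem.List.pyRange 0 (height + 1)).map (fun y =>
      (PySem.List.pyRange 0 (width + 1)).map (fun x => wallCell width height y x))
  let board := pySet2 board 13 7 player_character
  let board := pySet2 board 4 7 "B"
  (board, (13, 7))

-- ===== PRECONDITION & SPEC =====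
-- Pre_ excludes exactly the inputs where A raises IndexError: the hardcoded writes
-- board[13][7] and board[4][7] need height ≥ 13 and width ≥ 7.
def Pre_boss_room (width : Int) (height : Int) (player_character : String) : Prop :=
  7 ≤ width ∧ 13 ≤ height

instance (width : Int) (height : Int) (player_character : String) : Decidable (Pre_boss_room width height player_character) := by unfold Pre_boss_room; infer_instance

def pvWitness_boss_room : Int × Int × String := (7, 13, "@")

def Spec_boss_room (width : Int) (height : Int) (player_character : String) (out : List (List String) × (Int × Int)) : Prop := out = boss_room_alt width height player_character
instance (width : Int) (height : Int) (player_character : String) (out : List (List String) × (Int × Int)) : Decidable (Spec_boss_room width height player_character out) := by unfold Spec_boss_room; infer_instance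

-- ===== CLAIM (what is proved, stated in full; the proofs are below) =====
def Claim_equal_boss_room : Prop := ∀ (width : Int) (height : Int) (player_character : String), Dom_boss_room width height player_character → Pre_boss_room width height player_character → Spec_boss_room width height player_character (boss_room width height player_character)


-- ===== LEMMAS AND PROOFS =====

-- the per-cell value of the finished board, used only by the proofs below
def bossCell (width : Int) (height : Int) (player_character : String) (y x : Int) : String :=
  if y = 13 ∧ x = 7 then player_character
  else if y = 4 ∧ x = 7 then "B"
  else if x = 0 ∨ x = width ∨ y = 0 ∨ y = height then "x" else " "

-- 'b[y][x]' as an option: none iff either index is out of range.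
def elem2? (b : List (List String)) (y x : Nat) : Option String := b[y]?.bind (fun r => r[x]?)

theorem foldl_append_replicate {α : Type} (l : List Int) (v : α) (init : List α) :
    l.foldl (fun m _ => m ++ [v]) init = init ++ List.replicate l.length v := by
  induction l generalizing init with
  | nil => simp
  | cons t l ih =>
    rw [List.foldl_cons, ih]
    simp [List.replicate_succ]

theorem length_pySet2 (b : List (List String)) (i j : Int) (v : String) :
    (pySet2 b i j v).length = b.length := by
  unfold pySet2; split <;> simp

theorem length_foldl_pySet2 (l : List Int) (f g : Int → Int) (v : String) (b : List (List String)) :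
    (l.foldl (fun b t => pySet2 b (f t) (g t) v) b).length = b.length := by
  induction l generalizing b with
  | nil => rfl
  | cons t l ih => simp [List.foldl_cons, ih, length_pySet2]

theorem elem2?_pySet2 (b : List (List String)) (i j : Int) (v : String) (y x : Nat)
    (hi : 0 ≤ i) (hj : 0 ≤ j) :
    elem2? (pySet2 b i j v) y x =
      if i.toNat = y ∧ j.toNat = x then (elem2? b y x).map (fun _ => v) else elem2? b y x := by
  unfold pySet2 pySetRow elem2?
  split
  · rename_i h
    rw [List.getElem?_set]
    by_cases hy : i.toNat = y
    · subst hy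
      simp only [h.2, if_pos rfl, if_pos trivial, Option.bind_some,
        List.getElem?_eq_getElem h.2]
      split
      · rename_i hr
        rw [List.getElem?_set]
        by_cases hx : j.toNat = x
        · subst hx
          by_cases hlt : j.toNat < (b[i.toNat]).length
          · simp [hlt, List.getElem?_eq_getElem hlt]
          · omega
        · simp [hx, hj]
      · rename_i hr
        have hx : ¬ j.toNat = x ∨ ¬ x < (b[i.toNat]).length := by
          by_cases hx : j.toNat = x
          · right; omega
          · left; exact hx
        rcases hx with hx | hx
        · simp [hx, hj]
        · simp [hx]
    · simp [hy]
  · rename_i h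
    have hny : ¬ i.toNat < b.length := by
      intro hc; exact h ⟨hi, hc⟩
    split
    · rename_i hc
      have : b[y]? = none := List.getElem?_eq_none_iff.mpr (by omega)
      simp [this]
    · rfl

theorem elem2?_foldl_pySet2 (l : List Int) (f g : Int → Int) (v : String)
    (b : List (List String)) (y x : Nat)
    (hpos : ∀ t ∈ l, 0 ≤ f t ∧ 0 ≤ g t) :
    elem2? (l.foldl (fun b t => pySet2 b (f t) (g t) v) b) y x =
      if ∃ t ∈ l, (f t).toNat = y ∧ (g t).toNat = x
      then (elem2? b y x).map (fun _ => v) else elem2? b y x := by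
  induction l generalizing b with
  | nil => simp
  | cons t l ih =>
    have ht := hpos t (List.mem_cons_self ..)
    rw [List.foldl_cons, ih _ (fun s hs => hpos s (List.mem_cons_of_mem _ hs)),
      elem2?_pySet2 b (f t) (g t) v y x ht.1 ht.2]
    by_cases h1 : (f t).toNat = y ∧ (g t).toNat = x
    · simp only [if_pos h1]
      have : ∃ s ∈ t :: l, (f s).toNat = y ∧ (g s).toNat = x :=
        ⟨t, List.mem_cons_self .., h1⟩
      rw [if_pos this]
      split <;> cases elem2? b y x <;> rfl
    · simp only [if_neg h1]
      by_cases h2 : ∃ s ∈ l, (f s).toNat = y ∧ (g s).toNat = x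
      · rw [if_pos h2, if_pos (by rcases h2 with ⟨s, hs, hsp⟩; exact ⟨s, List.mem_cons_of_mem _ hs, hsp⟩)]
      · rw [if_neg h2, if_neg (by
          rintro ⟨s, hs, hsp⟩
          rcases List.mem_cons.mp hs with rfl | hs
          · exact h1 hsp
          · exact h2 ⟨s, hs, hsp⟩)]

theorem elem2?_boss_room (width height : Int) (pc : String)
    (hw : 7 ≤ width) (hh : 13 ≤ height) (y x : Nat) :
    elem2? (boss_room width height pc).1 y x =
      if (y : Int) < height + 1 ∧ (x : Int) < width + 1
      then some (bossCell width height pc y x) else none := by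
  unfold boss_room
  simp only
  rw [foldl_append_replicate, foldl_append_replicate, PySem.List.length_pyRange_one,
    PySem.List.length_pyRange_one]
  rw [elem2?_pySet2 _ 4 7 _ y x (by norm_num) (by norm_num),
    elem2?_pySet2 _ 13 7 _ y x (by norm_num) (by norm_num),
    elem2?_foldl_pySet2 _ (fun _ => height) (fun t => t) _ _ y x
      (fun t htm => ⟨by show (0:Int) ≤ height; omega, (PySem.List.mem_pyRange_one.mp htm).1⟩),
    elem2?_foldl_pySet2 _ (fun t => t) (fun _ => width) _ _ y x
      (fun t htm => ⟨(PySem.List.mem_pyRange_one.mp htm).1, by show (0:Int) ≤ width; omega⟩),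
    elem2?_foldl_pySet2 _ (fun _ => 0) (fun t => t) _ _ y x
      (fun t htm => ⟨le_refl 0, (PySem.List.mem_pyRange_one.mp htm).1⟩),
    elem2?_foldl_pySet2 _ (fun t => t) (fun _ => 0) _ _ y x
      (fun t htm => ⟨(PySem.List.mem_pyRange_one.mp htm).1, le_refl 0⟩)]
  simp only [List.nil_append]
  have hbase : elem2? (List.replicate (height + 1 - 0).toNat
      (List.replicate (width + 1 - 0).toNat " " : List String)) y x =
      if (y : Int) < height + 1 ∧ (x : Int) < width + 1 then some " " else none := by
    unfold elem2?
    rw [List.getElem?_replicate]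
    split
    · rename_i hyin
      rw [Option.bind_some, List.getElem?_replicate]
      split
      · rename_i hxin; rw [if_pos ⟨by omega, by omega⟩]
      · rename_i hxin; rw [if_neg (by omega)]
    · rename_i hyin
      rw [Option.bind_none, if_neg (by omega)]
  rw [hbase]
  have e1 : (∃ t ∈ PySem.List.pyRange 0 (height + 1), t.toNat = y ∧ Int.toNat 0 = x)
      ↔ ((y : Int) < height + 1 ∧ x = 0) := by
    simp only [PySem.List.mem_pyRange_one]
    constructor
    · rintro ⟨t, ⟨h0, hl⟩, hty, htx⟩; omega
    · rintro ⟨hy', hx'⟩; exact ⟨(y : Int), ⟨by omega, by omega⟩, by omega, by omega⟩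
  have e2 : (∃ t ∈ PySem.List.pyRange 0 (width + 1), Int.toNat 0 = y ∧ t.toNat = x)
      ↔ (y = 0 ∧ (x : Int) < width + 1) := by
    simp only [PySem.List.mem_pyRange_one]
    constructor
    · rintro ⟨t, ⟨h0, hl⟩, hty, htx⟩; omega
    · rintro ⟨hy', hx'⟩; exact ⟨(x : Int), ⟨by omega, by omega⟩, by omega, by omega⟩
  have e3 : (∃ t ∈ PySem.List.pyRange 0 (height + 1), t.toNat = y ∧ width.toNat = x)
      ↔ ((y : Int) < height + 1 ∧ (x : Int) = width) := by
    simp only [PySem.List.mem_pyRange_one]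
    constructor
    · rintro ⟨t, ⟨h0, hl⟩, hty, htx⟩; omega
    · rintro ⟨hy', hx'⟩; exact ⟨(y : Int), ⟨by omega, by omega⟩, by omega, by omega⟩
  have e4 : (∃ t ∈ PySem.List.pyRange 0 width, height.toNat = y ∧ t.toNat = x)
      ↔ ((y : Int) = height ∧ (x : Int) < width) := by
    simp only [PySem.List.mem_pyRange_one]
    constructor
    · rintro ⟨t, ⟨h0, hl⟩, hty, htx⟩; omega
    · rintro ⟨hy', hx'⟩; exact ⟨(x : Int), ⟨by omega, by omega⟩, by omega, by omega⟩
  have e5 : (Int.toNat 13 = y ∧ Int.toNat 7 = x) ↔ ((y : Int) = 13 ∧ (x : Int) = 7) := by omega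
  have e6 : (Int.toNat 4 = y ∧ Int.toNat 7 = x) ↔ ((y : Int) = 4 ∧ (x : Int) = 7) := by omega
  simp only [e1, e2, e3, e4, e5, e6]
  unfold bossCell
  by_cases hin : (y : Int) < height + 1 ∧ (x : Int) < width + 1
  · rw [if_pos hin, if_pos hin]
    split_ifs <;> (first | rfl | (simp only [Option.map_some]; first | rfl | (exfalso; omega)) | (exfalso; omega))
  · rw [if_neg hin, if_neg hin]
    split_ifs <;> (first | rfl | (simp only [Option.map_none]; first | rfl | (exfalso; omega)) | (exfalso; omega))

theorem elem2?_boss_room_alt (width height : Int) (pc : String)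
    (hw : 7 ≤ width) (hh : 13 ≤ height) (y x : Nat) :
    elem2? (boss_room_alt width height pc).1 y x =
      if (y : Int) < height + 1 ∧ (x : Int) < width + 1
      then some (bossCell width height pc y x) else none := by
  unfold boss_room_alt
  simp only
  rw [elem2?_pySet2 _ 4 7 _ y x (by norm_num) (by norm_num),
    elem2?_pySet2 _ 13 7 _ y x (by norm_num) (by norm_num)]
  have hgrid : elem2? ((PySem.List.pyRange 0 (height + 1)).map (fun y =>
      (PySem.List.pyRange 0 (width + 1)).map (fun x => wallCell width height y x))) y x =
      if (y : Int) < height + 1 ∧ (x : Int) < width + 1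
      then some (wallCell width height y x) else none := by
    unfold elem2?
    have hH : height + 1 = ((height + 1).toNat : Int) := by omega
    have hW : width + 1 = ((width + 1).toNat : Int) := by omega
    by_cases hy : y < (height + 1).toNat
    · rw [hH, PySem.List.getElem?_map_pyRange_zero _ _ y hy, Option.bind_some]
      by_cases hx : x < (width + 1).toNat
      · rw [hW, PySem.List.getElem?_map_pyRange_zero _ _ x hx, if_pos ⟨by omega, by omega⟩]
      · rw [List.getElem?_eq_none_iff.mpr (by
            rw [List.length_map, hW, PySem.List.length_pyRange_one]; omega),
          if_neg (by omega)]
    · rw [List.getElem?_eq_none_iff.mpr (by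
          rw [List.length_map, hH, PySem.List.length_pyRange_one]; omega),
        Option.bind_none, if_neg (by omega)]
  rw [hgrid]
  have e5 : (Int.toNat 13 = y ∧ Int.toNat 7 = x) ↔ ((y : Int) = 13 ∧ (x : Int) = 7) := by omega
  have e6 : (Int.toNat 4 = y ∧ Int.toNat 7 = x) ↔ ((y : Int) = 4 ∧ (x : Int) = 7) := by omega
  simp only [e5, e6]
  unfold bossCell wallCell
  by_cases hin : (y : Int) < height + 1 ∧ (x : Int) < width + 1
  · simp only [if_pos hin]
    split_ifs <;> (first | rfl | (simp only [Option.map_some]; first | rfl | (exfalso; omega)) | (exfalso; omega))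
  · simp only [if_neg hin]
    split_ifs <;> (first | rfl | (simp only [Option.map_none]; first | rfl | (exfalso; omega)) | (exfalso; omega))

theorem length_boss_room (width height : Int) (pc : String) :
    (boss_room width height pc).1.length = (height + 1).toNat := by
  unfold boss_room
  simp only
  rw [length_pySet2, length_pySet2, length_foldl_pySet2, length_foldl_pySet2,
    length_foldl_pySet2, length_foldl_pySet2, foldl_append_replicate]
  simp [PySem.List.length_pyRange_one]

theorem length_boss_room_alt (width height : Int) (pc : String) :
    (boss_room_alt width height pc).1.length = (height + 1).toNat := by
  unfold boss_room_alt
  simp only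
  rw [length_pySet2, length_pySet2]
  simp [PySem.List.length_pyRange_one]

-- ===== VERDICT (by name: the statement is the Claim_ definition above) =====
theorem boss_room_spec : Claim_equal_boss_room := by
  intro width height pc _hdom hpre
  obtain ⟨hw, hh⟩ := hpre
  unfold Spec_boss_room
  have hlen : (boss_room width height pc).1.length = (boss_room_alt width height pc).1.length := by
    rw [length_boss_room, length_boss_room_alt]
  have helem : ∀ y x : Nat, elem2? (boss_room width height pc).1 y x
      = elem2? (boss_room_alt width height pc).1 y x := by
    intro y x
    rw [elem2?_boss_room width height pc hw hh y x,
      elem2?_boss_room_alt width height pc hw hh y x]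
  have h1 : (boss_room width height pc).1 = (boss_room_alt width height pc).1 := by
    apply List.ext_getElem?
    intro y
    by_cases hy : y < (boss_room width height pc).1.length
    · have hy' : y < (boss_room_alt width height pc).1.length := by omega
      rw [List.getElem?_eq_getElem hy, List.getElem?_eq_getElem hy']
      congr 1
      apply List.ext_getElem?
      intro x
      have := helem y x
      unfold elem2? at this
      rwa [List.getElem?_eq_getElem hy, List.getElem?_eq_getElem hy',
        Option.bind_some, Option.bind_some] at this
    · rw [List.getElem?_eq_none_iff.mpr (by omega),
        List.getElem?_eq_none_iff.mpr (by omega)]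
  have h2 : (boss_room width height pc).2 = (boss_room_alt width height pc).2 := rfl
  exact Prod.ext h1 h2
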